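-- pv_equiv track=rewrite | github.com/tomer-shahaf-huji/LawSearch | app/utils.py | cut_first_n_words
-- ===== SOURCE A (Python) =====
-- FIRST_PASSAGE_WORD_COUNT = 100
--
-- def cut_first_n_words(text: str, n: int = FIRST_PASSAGE_WORD_COUNT) -> str:
--     sentences = [s.strip() for s in text.split('.') if s.strip()]
--     result, count = [], 0
--     for s in sentences:
--         word_count = len(s.split())
--         result.append(s)
--         count += word_count
--         if count >= n:
--             break
--     return '. '.join(result) + '.'
-- ===== SOURCE B (Python) =====
-- FIRST_PASSAGE_WORD_COUNT = 100
--
--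
-- def cut_first_n_words(text: str, n: int = FIRST_PASSAGE_WORD_COUNT) -> str:
--     sentences = [s.strip() for s in text.split('.') if s.strip()]
--     if not sentences:
--         return '.'
--     totals = []
--     t = 0
--     for s in sentences:
--         t += len(s.split())
--         totals.append(t)
--     cut = next((i for i, t in enumerate(totals) if t >= n), len(sentences) - 1)
--     return '. '.join(sentences[:cut + 1]) + '.'
-- ===== Notes on version B (the rewrite author's own statement) =====
-- stated objective: alternative
-- what changed: B replaces A's accumulate-and-break loop by a build-prefix-totals-table, find-cutoff-index, slice-and-join decomposition with an explicit early return for the no-sentences case.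
import Mathlib
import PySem

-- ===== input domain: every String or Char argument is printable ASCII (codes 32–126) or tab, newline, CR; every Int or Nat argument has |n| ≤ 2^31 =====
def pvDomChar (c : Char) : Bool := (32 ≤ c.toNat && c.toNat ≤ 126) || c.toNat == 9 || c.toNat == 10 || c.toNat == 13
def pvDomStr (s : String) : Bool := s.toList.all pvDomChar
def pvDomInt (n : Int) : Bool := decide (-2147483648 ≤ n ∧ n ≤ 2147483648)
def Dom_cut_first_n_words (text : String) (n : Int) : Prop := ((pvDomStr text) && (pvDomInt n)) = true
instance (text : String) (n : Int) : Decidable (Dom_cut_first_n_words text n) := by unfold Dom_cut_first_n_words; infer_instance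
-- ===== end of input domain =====

-- B replaces A's accumulate-and-break loop by a prefix-totals table, a cutoff-index search, and a slice+join (alternative decomposition, same cost).


-- ===== PORT A =====
-- the list comprehension [s.strip() for s in text.split('.') if s.strip()]
def pvSentences (text : String) : List String :=
  (((PySem.Str.split? text ".").getD []).map PySem.Str.strip).filter (fun s => s ≠ "")

-- A's 'for s in sentences: … if count >= n: break' loop, carrying result and count
def pvLoopA (n : Int) : List String → List String → Int → List String
  | [], result, _ => result
  | s :: rest, result, count =>
      let word_count : Int := ((PySem.Str.split₀ s).length : Int)
      let result := result ++ [s]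
      let count := count + word_count
      if n ≤ count then result else pvLoopA n rest result count

def cut_first_n_words (text : String) (n : Int) : String :=
  PySem.Str.join ". " (pvLoopA n (pvSentences text) [] 0) ++ "."

-- ===== PORT B =====
-- B's prefix-totals loop: totals.append(t) with t the running word total
def pvTotals (t : Int) : List String → List Int
  | [] => []
  | s :: rest =>
      let t' := t + ((PySem.Str.split₀ s).length : Int)
      t' :: pvTotals t' rest

def cut_first_n_words_alt (text : String) (n : Int) : String :=
  let sentences := pvSentences text
  if sentences = [] then "."
  else
    let totals := pvTotals 0 sentences
    let cut := (totals.findIdx? (fun t => decide (n ≤ t))).getD (sentences.length - 1)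
    PySem.Str.join ". " (PySem.List.slice sentences none (some ((cut : Int) + 1))) ++ "."

-- ===== PRECONDITION & SPEC =====
def Spec_cut_first_n_words (text : String) (n : Int) (out : String) : Prop := out = cut_first_n_words_alt text n
instance (text : String) (n : Int) (out : String) : Decidable (Spec_cut_first_n_words text n out) := by unfold Spec_cut_first_n_words; infer_instance

-- ===== CLAIM (what is proved, stated in full; the proofs are below) =====
def Claim_equal_cut_first_n_words : Prop := ∀ (text : String) (n : Int), Dom_cut_first_n_words text n → Spec_cut_first_n_words text n (cut_first_n_words text n)

-- ===== LEMMAS AND PROOFS =====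
-- A's break-loop returns acc ++ the prefix of l up to B's cutoff index (inclusive)
theorem pvLoopA_eq_take (n : Int) (l : List String) (acc : List String) (c : Int) :
    pvLoopA n l acc c =
      acc ++ l.take ((((pvTotals c l).findIdx? (fun t => decide (n ≤ t))).getD (l.length - 1)) + 1) := by
  induction l generalizing acc c with
  | nil => simp [pvLoopA, pvTotals]
  | cons s rest ih =>
    simp only [pvLoopA, pvTotals, List.findIdx?_cons]
    by_cases h : n ≤ c + ((PySem.Str.split₀ s).length : Int)
    · simp [h]
    · simp only [h, if_false, decide_eq_true_eq, ih]
      rcases hf : (pvTotals (c + ((PySem.Str.split₀ s).length : Int)) rest).findIdx?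
          (fun t => decide (n ≤ t)) with _ | j
      · simp only [Option.map_none, Option.getD_none]
        cases rest with
        | nil => simp
        | cons r rs => simp [List.append_assoc, List.take_succ_cons]
      · simp [List.append_assoc]

theorem cut_first_n_words_spec : Claim_equal_cut_first_n_words := by
  intro text n _
  unfold Spec_cut_first_n_words cut_first_n_words cut_first_n_words_alt
  by_cases hs : pvSentences text = []
  · rw [hs]
    simp [pvLoopA, PySem.Str.join]
  · simp only [hs, if_false]
    rw [PySem.List.slice_to _ (by positivity), pvLoopA_eq_take]
    simp
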